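-- pv_equiv track=rewrite | github.com/tanmoyjana/utility_tester | submission/satyaki/AdditionGame.py | getMaximumPoints
-- ===== SOURCE A (Python) =====
-- def getMaximumPoints(A, B, C, N):
--
--     gain = 0
--
--     if ((1 <= N <= 150) and (1 <= A <= 50) and (1 <= B <= 50) and (1 <= C <= 50)):
--
--         for i in range(N):
--
--             chosen_number = max(A, B, C)
--
--             gain = gain + chosen_number
--
--             if ((A == chosen_number) and (A > 0)) :
--
--                 A = A - 1
--
--             elif ((B == chosen_number) and (B > 0)):
--
--                 B = B - 1
--
--             elif ((C == chosen_number) and (C > 0)):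
--
--                 C = C - 1
--
--     return gain
-- ===== SOURCE B (Python) =====
-- def getMaximumPoints(A, B, C, N):
--     gain = 0
--     if (1 <= N <= 150) and (1 <= A <= 50) and (1 <= B <= 50) and (1 <= C <= 50):
--         # Each stack can only ever yield the values A, A-1, ..., 1 (then zeros);
--         # the greedy always takes the globally largest remaining value, so the
--         # total is simply the sum of the N largest values of the combined pool.
--         vals = sorted(list(range(A, 0, -1)) + list(range(B, 0, -1)) + list(range(C, 0, -1)),
--                       reverse=True)
--         gain = sum(vals[:N])
--     return gain
-- ===== Notes on version B (the rewrite author's own statement) =====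
-- stated objective: alternative
-- what changed: Replaces A's step-by-step simulation (N iterations of take-max-and-decrement over three counters) with a closed characterisation: materialise every value each counter can ever yield (A..1, B..1, C..1), sort the pool descending once, and sum its N largest elements.
import Mathlib
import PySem

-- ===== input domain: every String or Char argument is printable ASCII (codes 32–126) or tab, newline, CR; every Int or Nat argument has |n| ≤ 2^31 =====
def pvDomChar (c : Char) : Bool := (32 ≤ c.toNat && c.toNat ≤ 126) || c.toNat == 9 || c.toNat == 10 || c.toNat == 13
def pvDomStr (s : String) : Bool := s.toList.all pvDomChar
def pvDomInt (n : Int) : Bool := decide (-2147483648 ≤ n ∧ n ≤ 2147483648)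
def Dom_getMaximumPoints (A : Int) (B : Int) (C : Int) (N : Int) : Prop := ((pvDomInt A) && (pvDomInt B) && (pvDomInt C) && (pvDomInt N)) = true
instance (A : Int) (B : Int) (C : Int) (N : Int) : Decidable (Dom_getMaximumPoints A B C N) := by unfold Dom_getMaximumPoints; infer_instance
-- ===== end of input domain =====

-- B replaces A's N-step take-max-and-decrement simulation with a closed characterisation:
-- materialise every value each counter can ever yield (A..1, B..1, C..1), sort the pool
-- descending once, and sum its N largest elements; alternative algorithm, same answer.

-- ===== PORT A =====
-- one iteration of A's loop body over the state (A, B, C, gain)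
def stepA (s : Int × Int × Int × Int) : Int × Int × Int × Int :=
  let a := s.1; let b := s.2.1; let c := s.2.2.1
  let chosen := max a (max b c)          -- max(A, B, C)
  let g := s.2.2.2 + chosen
  if a = chosen ∧ 0 < a then (a - 1, b, c, g)
  else if b = chosen ∧ 0 < b then (a, b - 1, c, g)
  else if c = chosen ∧ 0 < c then (a, b, c - 1, g)
  else (a, b, c, g)

def getMaximumPoints (A : Int) (B : Int) (C : Int) (N : Int) : Int :=
  let gain : Int := 0
  if (1 ≤ N ∧ N ≤ 150) ∧ (1 ≤ A ∧ A ≤ 50) ∧ (1 ≤ B ∧ B ≤ 50) ∧ (1 ≤ C ∧ C ≤ 50) then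
    ((PySem.List.pyRange 0 N 1).foldl (fun s _ => stepA s) (A, B, C, gain)).2.2.2
  else gain

-- ===== PORT B =====
def getMaximumPoints_alt (A : Int) (B : Int) (C : Int) (N : Int) : Int :=
  let gain : Int := 0
  if (1 ≤ N ∧ N ≤ 150) ∧ (1 ≤ A ∧ A ≤ 50) ∧ (1 ≤ B ∧ B ≤ 50) ∧ (1 ≤ C ∧ C ≤ 50) then
    let vals := PySem.List.sorted
      (PySem.List.pyRange A 0 (-1) ++ PySem.List.pyRange B 0 (-1) ++ PySem.List.pyRange C 0 (-1))
      (fun x => x) true                                   -- sorted(..., reverse=True)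
    (PySem.List.slice vals none (some N)).sum             -- sum(vals[:N])
  else gain

-- ===== PRECONDITION & SPEC =====
def Spec_getMaximumPoints (A : Int) (B : Int) (C : Int) (N : Int) (out : Int) : Prop := out = getMaximumPoints_alt A B C N
instance (A : Int) (B : Int) (C : Int) (N : Int) (out : Int) : Decidable (Spec_getMaximumPoints A B C N out) := by unfold Spec_getMaximumPoints; infer_instance

-- ===== CLAIM (what is proved, stated in full; the proofs are below) =====
def Claim_equal_getMaximumPoints : Prop := ∀ (A : Int) (B : Int) (C : Int) (N : Int), Dom_getMaximumPoints A B C N → Spec_getMaximumPoints A B C N (getMaximumPoints A B C N)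

-- ===== LEMMAS AND PROOFS =====

-- the values a counter x can ever yield: [x, x-1, ..., 1]
def descOf (x : Int) : List Int := PySem.List.pyRange x 0 (-1)

def sortD (l : List Int) : List Int := PySem.List.sorted l (fun x => x) true

-- gain after n steps of A's loop
def simA : Nat → Int × Int × Int × Int → Int
  | 0, s => s.2.2.2
  | n+1, s => simA n (stepA s)

lemma foldl_stepA (l : List Int) : ∀ s,
    (l.foldl (fun s _ => stepA s) s).2.2.2 = simA l.length s := by
  induction l with
  | nil => intro s; rfl
  | cons x t ih => intro s; simpa [simA] using ih (stepA s)

-- descending sorts of permuted pools are equal (≤ on Int is antisymmetric)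
lemma sortD_unique {l₁ l₂ : List Int} (hp : l₁.Perm l₂)
    (h₁ : l₁.Pairwise (fun a b => b ≤ a)) (h₂ : l₂.Pairwise (fun a b => b ≤ a)) : l₁ = l₂ :=
  hp.eq_of_pairwise (fun _ _ _ _ h1 h2 => le_antisymm h2 h1) h₁ h₂

-- a maximal element of the pool heads its descending sort, the rest sorts the remainder
lemma sortD_cons_max {l l' : List Int} {m : Int} (hp : l.Perm (m :: l'))
    (hub : ∀ x ∈ l, x ≤ m) : sortD l = m :: sortD l' := by
  apply sortD_unique
  · exact (PySem.List.sorted_perm _ _ _).trans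
      (hp.trans ((PySem.List.sorted_perm l' (fun x => x) true).symm.cons m))
  · exact PySem.List.sorted_pairwise_rev l (fun x => x)
  · refine List.Pairwise.cons (fun x hx => ?_) (PySem.List.sorted_pairwise_rev l' (fun x => x))
    have hxl : x ∈ l := hp.symm.subset (List.mem_cons_of_mem m
      ((PySem.List.sorted_perm l' (fun x => x) true).subset hx))
    exact hub x hxl

lemma mem_descOf {x v : Int} : v ∈ descOf x ↔ 0 < v ∧ v ≤ x := by
  simpa [descOf] using PySem.List.mem_pyRange_neg_one (a := x) (b := 0) (x := v)

lemma descOf_cons {x : Int} (hx : 0 < x) : descOf x = x :: descOf (x - 1) := by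
  unfold descOf; exact PySem.List.pyRange_neg_one_cons hx

lemma descOf_nil {x : Int} (hx : x ≤ 0) : descOf x = [] := by
  simpa [descOf] using PySem.List.pyRange_neg_one_eq_nil (a := x) (b := 0) hx

-- main invariant: simulation gain = sum of the n largest pooled values
lemma sim_eq_topsum : ∀ (n : Nat) (a b c g : Int), 0 ≤ a → 0 ≤ b → 0 ≤ c →
    simA n (a, b, c, g) = g + ((sortD (descOf a ++ descOf b ++ descOf c)).take n).sum := by
  intro n
  induction n with
  | zero => intro a b c g _ _ _; simp [simA]
  | succ n ih =>
    intro a b c g ha hb hc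
    obtain ⟨m, hmdef⟩ : ∃ m, max a (max b c) = m := ⟨_, rfl⟩
    have ham : a ≤ m := hmdef ▸ le_max_left _ _
    have hbm : b ≤ m := hmdef ▸ le_trans (le_max_left _ _) (le_max_right _ _)
    have hcm : c ≤ m := hmdef ▸ le_trans (le_max_right _ _) (le_max_right _ _)
    have hmone : a = m ∨ b = m ∨ c = m := by
      rcases max_choice a (max b c) with e | e
      · left; omega
      · rcases max_choice b c with e2 | e2
        · right; left; rw [← hmdef, e, e2]
        · right; right; rw [← hmdef, e, e2]
    have hub : ∀ x ∈ descOf a ++ descOf b ++ descOf c, x ≤ m := by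
      intro x hx
      rcases List.mem_append.mp hx with hx | hx
      · rcases List.mem_append.mp hx with hx | hx
        · exact le_trans (mem_descOf.mp hx).2 ham
        · exact le_trans (mem_descOf.mp hx).2 hbm
      · exact le_trans (mem_descOf.mp hx).2 hcm
    by_cases hm0 : 0 < m
    · -- the chosen pile is the first counter equal to m; removing one copy of m
      -- from the pool is exactly decrementing that counter
      have key : ∃ a' b' c', stepA (a, b, c, g) = (a', b', c', g + m) ∧
          0 ≤ a' ∧ 0 ≤ b' ∧ 0 ≤ c' ∧
          (descOf a ++ descOf b ++ descOf c).Perm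
            (m :: (descOf a' ++ descOf b' ++ descOf c')) := by
        by_cases h1 : a = m
        · refine ⟨a - 1, b, c, ?_, by omega, hb, hc, ?_⟩
          · simp only [stepA, hmdef]; rw [if_pos ⟨h1, by omega⟩]
          · rw [descOf_cons (show 0 < a by omega), h1]; simp
        · have hma : ∀ x ∈ descOf a, x ≠ m := fun x hx e => by
            have := mem_descOf.mp hx; omega
          by_cases h2 : b = m
          · refine ⟨a, b - 1, c, ?_, ha, by omega, hc, ?_⟩
            · simp only [stepA, hmdef]
              rw [if_neg (fun hh => h1 hh.1), if_pos ⟨h2, by omega⟩]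
            · rw [descOf_cons (show 0 < b by omega), h2]
              exact
                (List.perm_middle (a := m) (l₁ := descOf a) (l₂ := descOf (m - 1))).append_right
                  (descOf c)
          · have h3 : c = m := by rcases hmone with e | e | e <;> first | exact absurd e h1 | exact absurd e h2 | exact e
            refine ⟨a, b, c - 1, ?_, ha, hb, by omega, ?_⟩
            · simp only [stepA, hmdef]
              rw [if_neg (fun hh => h1 hh.1), if_neg (fun hh => h2 hh.1),
                  if_pos ⟨h3, by omega⟩]
            · rw [descOf_cons (show 0 < c by omega), h3]
              simpa using List.perm_middle (a := m) (l₁ := descOf a ++ descOf b) (l₂ := descOf (m - 1))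
      obtain ⟨a', b', c', hstep, ha', hb', hc', hperm⟩ := key
      have hsort : sortD (descOf a ++ descOf b ++ descOf c) =
          m :: sortD (descOf a' ++ descOf b' ++ descOf c') := sortD_cons_max hperm hub
      calc simA (n + 1) (a, b, c, g)
          = simA n (a', b', c', g + m) := by rw [simA, hstep]
        _ = (g + m) + ((sortD (descOf a' ++ descOf b' ++ descOf c')).take n).sum :=
            ih a' b' c' (g + m) ha' hb' hc'
        _ = g + ((sortD (descOf a ++ descOf b ++ descOf c)).take (n + 1)).sum := by
            rw [hsort]; simp; ring
    · -- all counters are 0: the pool is empty and every further step adds 0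
      have haz : a = 0 := by omega
      subst haz
      have hbz : b = 0 := by omega
      subst hbz
      have hcz : c = 0 := by omega
      subst hcz
      have hstep : stepA (0, 0, 0, g) = (0, 0, 0, g) := by
        simp [stepA]
      rw [simA, hstep, ih 0 0 0 g le_rfl le_rfl le_rfl, descOf_nil le_rfl]
      simp [sortD, PySem.List.sorted]

-- ===== VERDICT (by name: the statement is the Claim_ definition above) =====
theorem getMaximumPoints_spec : Claim_equal_getMaximumPoints := by
  intro A B C N _
  unfold Spec_getMaximumPoints
  simp only [getMaximumPoints, getMaximumPoints_alt]
  split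
  · next hP =>
    obtain ⟨⟨hN, _⟩, ⟨hA, _⟩, ⟨hB, _⟩, ⟨hC, _⟩⟩ := hP
    rw [foldl_stepA, PySem.List.length_pyRange_one,
      sim_eq_topsum _ A B C 0 (by omega) (by omega) (by omega),
      PySem.List.slice_to _ (by omega : (0:Int) ≤ N)]
    simp [sortD, descOf]
  · rfl
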